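-- pv_equiv track=rewrite | github.com/Taurreason/Sprint_1 | additional_task_1.py | organize_tickets
-- ===== SOURCE A (Python) =====
-- def remove_duplicates_in_lists(tickets):
--     new_tickets = {}
--     for k, v in tickets.items():
--         unique = []
--         for ticket in v:
--             if ticket not in unique:
--                 unique.append(ticket)
--         new_tickets[k] = unique
--     return new_tickets
--
-- def organize_tickets(types, tickets):
--     tickets = remove_duplicates_in_lists(tickets)
--     result = {}
--     used_tickets = []
--
--     for level in sorted(types):  # Уровни от 1 до 5
--         current = []
--         for ticket in tickets.get(level, []):
--             if ticket not in used_tickets: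
--                 current.append(ticket)
--                 used_tickets.append(ticket)
--         result[types[level]] = current
--     return result
-- ===== SOURCE B (Python) =====
-- def organize_tickets(types, tickets):
--     # Inverted strategy: first compute, for every ticket value, its unique "owner"
--     # slot (level, first index) by overwriting through levels in reverse sorted
--     # order; then emit each level's bucket statelessly from that ownership map.
--     levels = sorted(types)
--     owner = {}
--     for level in reversed(levels):
--         for i, t in reversed(list(enumerate(tickets.get(level, [])))):
--             owner[t] = (level, i)
--     result = {}
--     for level in levels:
--         result[types[level]] = [t for i, t in enumerate(tickets.get(level, []))
--                                 if owner[t] == (level, i)]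
--     return result
-- ===== Notes on version B (the rewrite author's own statement) =====
-- stated objective: faster
-- what changed: Inverts the algorithm: instead of a dedup pre-pass plus a growing used_tickets list scanned for every ticket, B makes one reverse pass over the sorted levels overwriting an ownership dict that maps each ticket value to its (first level, first index) slot, then emits every bucket statelessly by checking ownership; no seen list and no per-key dedup helper remain.
import Mathlib
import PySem

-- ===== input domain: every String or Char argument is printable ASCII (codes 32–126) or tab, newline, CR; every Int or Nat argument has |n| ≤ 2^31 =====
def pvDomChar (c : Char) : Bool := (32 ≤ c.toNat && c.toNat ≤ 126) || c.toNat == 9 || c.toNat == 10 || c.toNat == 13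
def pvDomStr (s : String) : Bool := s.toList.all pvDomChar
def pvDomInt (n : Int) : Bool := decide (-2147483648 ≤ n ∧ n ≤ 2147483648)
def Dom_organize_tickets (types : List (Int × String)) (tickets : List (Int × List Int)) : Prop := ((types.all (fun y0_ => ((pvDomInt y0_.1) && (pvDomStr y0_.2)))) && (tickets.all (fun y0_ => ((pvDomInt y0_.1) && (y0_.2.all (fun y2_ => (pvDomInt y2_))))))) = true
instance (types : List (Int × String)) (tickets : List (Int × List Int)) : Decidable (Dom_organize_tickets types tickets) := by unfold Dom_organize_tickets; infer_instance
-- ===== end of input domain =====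

-- B inverts A: a reverse pass builds an ownership dict (ticket ↦ first (level, index) slot),
-- then each bucket is emitted statelessly from it — no dedup pre-pass, no used_tickets scans
-- (objective: faster; return value only).


-- ===== PORT A =====
-- helper: the inner 'unique' loop of remove_duplicates_in_lists
def pvDedupLoop (v : List Int) : List Int :=
  v.foldl (fun unique t => if t ∈ unique then unique else unique ++ [t]) []

-- helper: remove_duplicates_in_lists
def pvRemoveDuplicates (tickets : PySem.Dict Int (List Int)) : PySem.Dict Int (List Int) :=
  tickets.items.foldl (fun d p => d.insert p.1 (pvDedupLoop p.2)) PySem.Dict.empty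

def organize_tickets (types : List (Int × String)) (tickets : List (Int × List Int)) : List (String × List Int) :=
  let typesD := PySem.Dict.ofList types
  let ticketsD := pvRemoveDuplicates (PySem.Dict.ofList tickets)
  -- for level in sorted(types): inner loop over tickets.get(level, []) with (current, used_tickets)
  let st := (PySem.List.sorted typesD.keys (fun x => x) false).foldl
    (fun (st : PySem.Dict String (List Int) × List Int) level =>
      let inner := (ticketsD.getD level []).foldl
        (fun (cu : List Int × List Int) t =>
          if t ∈ cu.2 then cu else (cu.1 ++ [t], cu.2 ++ [t])) ([], st.2)
      (st.1.insert (typesD.getD level "") inner.1, inner.2))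
    (PySem.Dict.empty, [])
  st.1.items

-- ===== PORT B =====
def organize_tickets_alt (types : List (Int × String)) (tickets : List (Int × List Int)) : List (String × List Int) :=
  let typesD := PySem.Dict.ofList types
  let ticketsD := PySem.Dict.ofList tickets
  let levels := PySem.List.sorted typesD.keys (fun x => x) false
  -- for level in reversed(levels): for i, t in reversed(list(enumerate(...))): owner[t] = (level, i)
  let owner := levels.reverse.foldl
    (fun (d : PySem.Dict Int (Int × Int)) lv =>
      ((PySem.List.enumerate (ticketsD.getD lv []) 0).reverse).foldl
        (fun d p => d.insert p.2 (lv, p.1)) d)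
    PySem.Dict.empty
  -- for level in levels: result[types[level]] = [t for i, t in enumerate(...) if owner[t] == (level, i)]
  let res := levels.foldl
    (fun (r : PySem.Dict String (List Int)) lv =>
      r.insert (typesD.getD lv "")
        (((PySem.List.enumerate (ticketsD.getD lv []) 0).filter
            (fun p => owner.get? p.2 == some (lv, p.1))).map (fun p => p.2)))
    PySem.Dict.empty
  res.items

-- ===== PRECONDITION & SPEC =====
def Spec_organize_tickets (types : List (Int × String)) (tickets : List (Int × List Int)) (out : List (String × List Int)) : Prop := out = organize_tickets_alt types tickets
instance (types : List (Int × String)) (tickets : List (Int × List Int)) (out : List (String × List Int)) : Decidable (Spec_organize_tickets types tickets out) := by unfold Spec_organize_tickets; infer_instance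

-- ===== CLAIM (what is proved, stated in full; the proofs are below) =====
def Claim_equal_organize_tickets : Prop := ∀ (types : List (Int × String)) (tickets : List (Int × List Int)), Dom_organize_tickets types tickets → Spec_organize_tickets types tickets (organize_tickets types tickets)

-- ===== LEMMAS AND PROOFS =====

-- A's hand-written 'unique' loop is exactly ordered first-occurrence dedup.
theorem pvDedupLoop_eq_dedup (v : List Int) : pvDedupLoop v = PySem.List.dedup v := by
  rw [pvDedupLoop, PySem.List.dedup_eq_ofList, PySem.Set.ofList_eq_foldl]
  apply PySem.List.foldl_congr_mem
  intro u t _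
  simp [PySem.Set.add]

-- remove_duplicates_in_lists, read through getD: it dedups each stored list.
theorem getD_removeDuplicates (d : PySem.Dict Int (List Int)) (hnd : d.keys.Nodup) (k : Int) :
    (pvRemoveDuplicates d).getD k [] = PySem.List.dedup (d.getD k []) := by
  have hitems : (pvRemoveDuplicates d).items =
      PySem.Dict.empty.items ++ d.items.map (fun p => (p.1, pvDedupLoop p.2)) := by
    rw [pvRemoveDuplicates]
    exact PySem.Dict.items_foldl_insert_fresh d.items (fun p => p.1) (fun p => pvDedupLoop p.2)
      PySem.Dict.empty (by intro a _; simp [PySem.Dict.contains_empty]) hnd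
  have hkeys : (pvRemoveDuplicates d).keys = d.keys := by
    simp only [PySem.Dict.keys, hitems]
    simp [List.map_map]
    rfl
  by_cases hk : k ∈ d.keys
  · obtain ⟨v, hv⟩ : ∃ v, (k, v) ∈ d.items := by
      simp only [PySem.Dict.keys] at hk
      obtain ⟨p, hp, hpe⟩ := List.mem_map.mp hk
      exact ⟨p.2, by simpa [← hpe] using hp⟩
    have h1 : d.getD k [] = v := PySem.Dict.getD_of_mem_items d hv hnd []
    have h2 : (k, pvDedupLoop v) ∈ (pvRemoveDuplicates d).items := by
      rw [hitems]
      exact List.mem_append_right _ (List.mem_map.mpr ⟨(k, v), hv, rfl⟩)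
    have h3 := PySem.Dict.getD_of_mem_items (pvRemoveDuplicates d) h2
      (by rw [hkeys]; exact hnd) []
    rw [h3, h1, pvDedupLoop_eq_dedup]
  · have c1 : d.contains k = false := by
      by_contra h
      exact hk ((PySem.Dict.contains_iff_mem_keys d k).mp (by simpa using h))
    have c2 : (pvRemoveDuplicates d).contains k = false := by
      by_contra h
      refine hk ?_
      have := (PySem.Dict.contains_iff_mem_keys (pvRemoveDuplicates d) k).mp (by simpa using h)
      rwa [hkeys] at this
    rw [PySem.Dict.getD_of_not_contains d [] c1,
        PySem.Dict.getD_of_not_contains (pvRemoveDuplicates d) [] c2]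
    simp [PySem.List.dedup]

-- A's inner (current, used) loop over a duplicate-free list is filter + bulk extend.
theorem inner_loop_eq_filter (l : List Int) (hnd : l.Nodup) (c u : List Int) :
    l.foldl (fun (cu : List Int × List Int) t =>
        if t ∈ cu.2 then cu else (cu.1 ++ [t], cu.2 ++ [t])) (c, u)
      = (c ++ l.filter (fun t => !u.contains t), u ++ l.filter (fun t => !u.contains t)) := by
  induction l generalizing c u with
  | nil => simp
  | cons a l ih =>
    obtain ⟨ha, hl⟩ := List.nodup_cons.mp hnd
    by_cases hau : a ∈ u
    · simp only [List.foldl_cons, if_pos hau]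
      rw [ih hl c u]
      simp [hau]
    · simp only [List.foldl_cons, if_neg hau]
      rw [ih hl (c ++ [a]) (u ++ [a])]
      have hf : l.filter (fun t => !(u ++ [a]).contains t) = l.filter (fun t => !u.contains t) := by
        apply List.filter_congr
        intro t ht
        have : t ≠ a := fun h => ha (h ▸ ht)
        simp [List.contains_eq_mem, this]
      rw [hf]
      simp [hau, List.append_assoc]

theorem pv_discard_eq_filter (s : List Int) (x : Int) :
    PySem.Set.discard s x = s.filter (fun y => !(y == x)) := rfl

theorem pv_index?_some_of_mem (xs : List Int) (v : Int) (h : v ∈ xs) :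
    ∃ j, PySem.List.index? xs v = some j :=
  Option.isSome_iff_exists.mp ((PySem.List.index?_isSome_iff xs v).mpr h)

-- Specification of B's ownership map: the first level of L whose list contains t,
-- paired with t's first index there.
def pvFirstOwn (G : Int → List Int) : List Int → Int → Option (Int × Int)
  | [], _ => none
  | lv :: rest, t =>
    ((PySem.List.index? (G lv) t).map (fun (i : Nat) => ((lv, (i : Int)) : Int × Int))).or
      (pvFirstOwn G rest t)

-- One level's reversed-enumerate insertion loop, read through get?.
theorem revfold_insert_get (lv t : Int) (lst : List Int) : ∀ (n : Int) (d : PySem.Dict Int (Int × Int)),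
    (((PySem.List.enumerate lst n).reverse).foldl (fun d p => d.insert p.2 (lv, p.1)) d).get? t
      = ((PySem.List.index? lst t).map (fun (i : Nat) => ((lv, n + (i : Int)) : Int × Int))).or (d.get? t) := by
  induction lst with
  | nil => intro n d; simp [PySem.List.enumerate_nil, PySem.List.index?_eq_idxOf?]
  | cons a l ih =>
    intro n d
    rw [PySem.List.enumerate_cons, List.reverse_cons, List.foldl_append]
    by_cases hta : t = a
    · subst hta
      simp only [List.foldl_cons, List.foldl_nil, PySem.Dict.get?_insert_self,
        PySem.List.index?_cons_self]
      simp
    · simp only [List.foldl_cons, List.foldl_nil]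
      rw [PySem.Dict.get?_insert_of_ne _ _ hta, ih (n + 1) d,
        PySem.List.index?_cons_of_ne _ (fun h => hta h.symm)]
      cases hidx : PySem.List.index? l t with
      | none => simp
      | some i =>
        simp only [Option.map_some]
        have : n + 1 + (i : Int) = n + ((i : Int) + 1) := by ring
        simp [this]

-- The whole reverse pass builds exactly pvFirstOwn.
theorem owner_get (G : Int → List Int) (t : Int) : ∀ (L : List Int) (d : PySem.Dict Int (Int × Int)),
    ((L.reverse).foldl
        (fun d lv => ((PySem.List.enumerate (G lv) 0).reverse).foldl
          (fun d p => d.insert p.2 (lv, p.1)) d) d).get? t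
      = (pvFirstOwn G L t).or (d.get? t) := by
  intro L
  induction L with
  | nil => intro d; simp [pvFirstOwn]
  | cons lv L ih =>
    intro d
    rw [List.reverse_cons, List.foldl_append]
    simp only [List.foldl_cons, List.foldl_nil]
    rw [revfold_insert_get, ih d]
    simp only [pvFirstOwn]
    cases hidx : PySem.List.index? (G lv) t with
    | none => simp
    | some i => simp

theorem firstOwn_append (G : Int → List Int) (t : Int) : ∀ (P R : List Int),
    pvFirstOwn G (P ++ R) t = (pvFirstOwn G P t).or (pvFirstOwn G R t) := by
  intro P R
  induction P with
  | nil => simp [pvFirstOwn]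
  | cons lv P ih =>
    rw [List.cons_append]
    show pvFirstOwn G (lv :: (P ++ R)) t = _
    simp only [pvFirstOwn, ih, Option.or_assoc]

theorem firstOwn_none_iff (G : Int → List Int) (t : Int) : ∀ (P : List Int),
    pvFirstOwn G P t = none ↔ ∀ lv ∈ P, t ∉ G lv := by
  intro P
  induction P with
  | nil => simp [pvFirstOwn]
  | cons lv P ih =>
    simp only [pvFirstOwn, Option.or_eq_none_iff, Option.map_eq_none_iff, ih,
      PySem.List.index?_eq_none_iff, List.mem_cons]
    constructor
    · rintro ⟨h1, h2⟩ x (rfl | hx)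
      · exact h1
      · exact h2 x hx
    · intro h
      exact ⟨h lv (Or.inl rfl), fun x hx => h x (Or.inr hx)⟩

theorem firstOwn_some (G : Int → List Int) (t : Int) : ∀ (P : List Int) (x : Int × Int),
    pvFirstOwn G P t = some x → x.1 ∈ P ∧ t ∈ G x.1 := by
  intro P
  induction P with
  | nil => intro x h; simp [pvFirstOwn] at h
  | cons lv P ih =>
    intro x h
    simp only [pvFirstOwn] at h
    cases hidx : PySem.List.index? (G lv) t with
    | some i =>
      rw [hidx] at h
      simp only [Option.map_some, Option.some_or, Option.some_inj] at h
      subst h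
      exact ⟨List.mem_cons_self, (PySem.List.index?_isSome_iff (G lv) t).mp (by rw [hidx]; rfl)⟩
    | none =>
      rw [hidx] at h
      simp only [Option.map_none, Option.none_or] at h
      obtain ⟨h1, h2⟩ := ih x h
      exact ⟨List.mem_cons_of_mem _ h1, h2⟩

-- The comprehension filter "first global occurrence at own index" is dedup-then-filter.
theorem dedup_enum_filter (q : Int → Bool) : ∀ (lst pre : List Int),
    ((PySem.List.enumerate lst (pre.length : Int)).filter
        (fun p => q p.2 && ((PySem.List.index? (pre ++ lst) p.2).map (fun (n : Nat) => (n : Int)) == some p.1))).map (fun p => p.2)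
      = (PySem.List.dedup lst).filter (fun t => q t && !pre.contains t) := by
  intro lst
  induction lst with
  | nil => intro pre; simp [PySem.List.enumerate_nil, PySem.List.dedup]
  | cons a l ih =>
    intro pre
    rw [PySem.List.enumerate_cons]
    have hcond : ((PySem.List.index? (pre ++ a :: l) a).map (fun (n : Nat) => (n : Int)) == some ((pre.length : Int))) = !pre.contains a := by
      by_cases ha : a ∈ pre
      · obtain ⟨j, hj⟩ := pv_index?_some_of_mem pre a ha
        obtain ⟨hk, _, _⟩ := PySem.List.getElem_of_index?_eq_some hj
        rw [PySem.List.index?_append_of_mem _ ha, hj]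
        have hne : ((j : Int) == (pre.length : Int)) = false := by
          simp only [beq_eq_false_iff_ne, ne_eq, Int.natCast_inj]
          omega
        simp only [Option.map_some, List.contains_eq_mem, ha, decide_true, Bool.not_true]
        simpa using hne
      · have h1 : pre ++ a :: l = (pre ++ [a]) ++ l := by simp
        rw [h1, PySem.List.index?_append_of_mem _ (by simp),
          PySem.List.index?_append_singleton_self _ _ ha]
        simp [ha, List.contains_eq_mem]
    have htail : pre ++ a :: l = (pre ++ [a]) ++ l := by simp
    have hlen : (pre.length : Int) + 1 = (((pre ++ [a]).length : Nat) : Int) := by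
      simp
    rw [PySem.List.dedup_eq_ofList, PySem.Set.ofList_cons, ← PySem.List.dedup_eq_ofList]
    by_cases hhead : (q a && !pre.contains a) = true
    · have hc : (q a && ((PySem.List.index? (pre ++ a :: l) a).map (fun (n : Nat) => (n : Int)) == some ((pre.length : Int)))) = true := by
        rw [hcond]; exact hhead
      rw [List.filter_cons, if_pos hc, List.map_cons]
      rw [htail, hlen, ih (pre ++ [a])]
      rw [List.filter_cons, if_pos hhead]
      congr 1
      rw [pv_discard_eq_filter, List.filter_filter]
      apply List.filter_congr
      intro t _
      simp only [List.contains_eq_mem, List.mem_append, List.mem_singleton]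
      by_cases h1 : t = a <;> by_cases h2 : t ∈ pre <;> simp [h1, h2]
    · have hc : (q a && ((PySem.List.index? (pre ++ a :: l) a).map (fun (n : Nat) => (n : Int)) == some ((pre.length : Int)))) = false := by
        rw [hcond]; simpa using hhead
      rw [List.filter_cons, if_neg (by simp only [hc]; exact Bool.false_ne_true), htail, hlen,
        ih (pre ++ [a])]
      rw [List.filter_cons, if_neg (by simpa using hhead)]
      rw [pv_discard_eq_filter, List.filter_filter]
      apply List.filter_congr
      intro t _
      simp only [List.contains_eq_mem, List.mem_append, List.mem_singleton]
      by_cases h1 : t = a <;> by_cases h2 : t ∈ pre <;> simp [h1, h2]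

-- B's bucket at level lv equals A's "dedup then drop already-seen" bucket, given that
-- seen holds exactly the tickets of the levels before lv.
theorem bucket_eq (G : Int → List Int) (L P R : List Int) (lv : Int)
    (hL : L = P ++ lv :: R) (hnd : L.Nodup) (seen : List Int)
    (hseen : ∀ t, seen.contains t = true ↔ ∃ lv' ∈ P, t ∈ G lv') :
    ((PySem.List.enumerate (G lv) 0).filter
        (fun p => (((L.reverse).foldl
            (fun d lv => ((PySem.List.enumerate (G lv) 0).reverse).foldl
              (fun d p => d.insert p.2 (lv, p.1)) d) PySem.Dict.empty).get? p.2 == some (lv, p.1)))).map (fun p => p.2)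
      = (PySem.List.dedup (G lv)).filter (fun t => !seen.contains t) := by
  have hlvP : lv ∉ P := by
    rw [hL] at hnd
    have := (List.nodup_append.mp hnd).2.2
    intro hmem
    exact this lv hmem lv List.mem_cons_self rfl
  have hmain := dedup_enum_filter (fun t => !seen.contains t) (G lv) []
  simp only [List.length_nil, Int.natCast_zero, List.nil_append, List.contains_nil,
    Bool.not_false, Bool.and_true] at hmain
  rw [← hmain]
  congr 1
  apply List.filter_congr
  intro p hp
  obtain ⟨k, hk, hpk⟩ := (PySem.List.mem_enumerate_iff (G lv) 0 p).mp hp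
  have htmem : p.2 ∈ G lv := by rw [hpk]; simp
  rw [owner_get, PySem.Dict.get?_empty, Option.or_none, hL, firstOwn_append]
  cases hP : pvFirstOwn G P p.2 with
  | some x =>
    have ⟨hx1, hx2⟩ := firstOwn_some G p.2 P x hP
    have hne : x.1 ≠ lv := fun h => hlvP (h ▸ hx1)
    have hseenT : seen.contains p.2 = true := (hseen p.2).mpr ⟨x.1, hx1, hx2⟩
    have hL1 : (some x == some (lv, p.1)) = false := by
      simp only [beq_eq_false_iff_ne, ne_eq, Option.some_inj]
      intro h; exact hne (by rw [h])
    have hmemseen : p.2 ∈ seen := by simpa using hseenT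
    simp [hL1, hmemseen]
  | none =>
    have hseenT : seen.contains p.2 = false := by
      rw [← Bool.not_eq_true, hseen p.2]
      rintro ⟨lv', hlv', hmem⟩
      exact (firstOwn_none_iff G p.2 P).mp hP lv' hlv' hmem
    obtain ⟨i0, hi0⟩ := pv_index?_some_of_mem (G lv) p.2 htmem
    simp only [Option.none_or, pvFirstOwn, hi0, Option.map_some, Option.some_or, hseenT,
      Bool.not_false, Bool.true_and]
    simp [Prod.ext_iff]

-- The main folds: A's (result, seen) loop versus B's stateless-bucket loop.
theorem fold_eq (G : Int → List Int) (name : Int → String) (bucketB : Int → List Int)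
    (L : List Int)
    (hB : ∀ (P : List Int) (lv : Int) (R : List Int) (seen : List Int), L = P ++ lv :: R →
      (∀ t, seen.contains t = true ↔ ∃ lv' ∈ P, t ∈ G lv') →
      bucketB lv = (PySem.List.dedup (G lv)).filter (fun t => !seen.contains t)) :
    ∀ (R P : List Int) (res : PySem.Dict String (List Int)) (seen : List Int),
      L = P ++ R →
      (∀ t, seen.contains t = true ↔ ∃ lv' ∈ P, t ∈ G lv') →
      (R.foldl (fun (st : PySem.Dict String (List Int) × List Int) lv =>
          (st.1.insert (name lv) ((PySem.List.dedup (G lv)).filter (fun t => !st.2.contains t)),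
           st.2 ++ (PySem.List.dedup (G lv)).filter (fun t => !st.2.contains t))) (res, seen)).1
        = R.foldl (fun r lv => r.insert (name lv) (bucketB lv)) res := by
  intro R
  induction R with
  | nil => intro P res seen _ _; rfl
  | cons lv R ih =>
    intro P res seen hLP hseen
    simp only [List.foldl_cons]
    rw [hB P lv R seen hLP hseen]
    apply ih (P ++ [lv])
    · rw [hLP]; simp
    · intro t
      have hmem : (seen ++ (PySem.List.dedup (G lv)).filter (fun t => !seen.contains t)).contains t = true
          ↔ seen.contains t = true ∨ t ∈ G lv := by
        simp only [List.contains_eq_mem, List.mem_append, List.mem_filter,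
          PySem.List.mem_dedup, decide_eq_true_eq]
        constructor
        · rintro (h | ⟨h, _⟩)
          · left; simpa using h
          · right; exact h
        · rintro (h | h)
          · left; simpa using h
          · by_cases hs : t ∈ seen
            · left; simpa using hs
            · right; exact ⟨h, by simp [hs]⟩
      rw [hmem, hseen t]
      constructor
      · rintro (⟨lv', h1, h2⟩ | h)
        · exact ⟨lv', by simp [h1], h2⟩
        · exact ⟨lv, by simp, h⟩
      · rintro ⟨lv', h1, h2⟩
        rcases List.mem_append.mp h1 with h1 | h1
        · exact Or.inl ⟨lv', h1, h2⟩
        · rcases List.mem_singleton.mp h1 with rfl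
          exact Or.inr h2

-- ===== VERDICT (by name: the statement is the Claim_ definition above) =====
theorem organize_tickets_spec : Claim_equal_organize_tickets := by
  intro types tickets _
  have hndkeys : (PySem.Dict.ofList tickets).keys.Nodup := PySem.Dict.nodup_keys_ofList tickets
  have hndL : (PySem.List.sorted (PySem.Dict.ofList types).keys (fun x => x) false).Nodup :=
    (PySem.List.sorted_perm _ _ _).nodup_iff.mpr (PySem.Dict.nodup_keys_ofList types)
  show ((PySem.List.sorted (PySem.Dict.ofList types).keys (fun x => x) false).foldl
      (fun (st : PySem.Dict String (List Int) × List Int) (level : Int) =>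
        (st.1.insert ((PySem.Dict.ofList types).getD level "")
            (((pvRemoveDuplicates (PySem.Dict.ofList tickets)).getD level []).foldl
              (fun (cu : List Int × List Int) t =>
                if t ∈ cu.2 then cu else (cu.1 ++ [t], cu.2 ++ [t])) ([], st.2)).1,
         (((pvRemoveDuplicates (PySem.Dict.ofList tickets)).getD level []).foldl
              (fun (cu : List Int × List Int) t =>
                if t ∈ cu.2 then cu else (cu.1 ++ [t], cu.2 ++ [t])) ([], st.2)).2))
      (PySem.Dict.empty, [])).1.items
    = ((PySem.List.sorted (PySem.Dict.ofList types).keys (fun x => x) false).foldl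
      (fun (r : PySem.Dict String (List Int)) (lv : Int) =>
        r.insert ((PySem.Dict.ofList types).getD lv "")
          (((PySem.List.enumerate ((PySem.Dict.ofList tickets).getD lv []) 0).filter
              (fun p => (((PySem.List.sorted (PySem.Dict.ofList types).keys (fun x => x) false).reverse.foldl
                  (fun (d : PySem.Dict Int (Int × Int)) lv =>
                    ((PySem.List.enumerate ((PySem.Dict.ofList tickets).getD lv []) 0).reverse).foldl
                      (fun d p => d.insert p.2 (lv, p.1)) d)
                  PySem.Dict.empty).get? p.2 == some (lv, p.1)))).map (fun p => p.2)))
      PySem.Dict.empty).items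
  congr 1
  have hstep : (fun (st : PySem.Dict String (List Int) × List Int) (level : Int) =>
      ((st.1.insert ((PySem.Dict.ofList types).getD level "")
            (((pvRemoveDuplicates (PySem.Dict.ofList tickets)).getD level []).foldl
              (fun (cu : List Int × List Int) t =>
                if t ∈ cu.2 then cu else (cu.1 ++ [t], cu.2 ++ [t])) ([], st.2)).1,
         (((pvRemoveDuplicates (PySem.Dict.ofList tickets)).getD level []).foldl
              (fun (cu : List Int × List Int) t =>
                if t ∈ cu.2 then cu else (cu.1 ++ [t], cu.2 ++ [t])) ([], st.2)).2)))
    = (fun (st : PySem.Dict String (List Int) × List Int) (lv : Int) =>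
      (st.1.insert ((PySem.Dict.ofList types).getD lv "")
          ((PySem.List.dedup ((PySem.Dict.ofList tickets).getD lv [])).filter (fun t => !st.2.contains t)),
       st.2 ++ (PySem.List.dedup ((PySem.Dict.ofList tickets).getD lv [])).filter (fun t => !st.2.contains t))) := by
    funext st lv
    rw [getD_removeDuplicates _ hndkeys lv,
      inner_loop_eq_filter _ (PySem.List.nodup_dedup _) [] st.2]
    simp
  rw [hstep]
  exact fold_eq (fun lv => (PySem.Dict.ofList tickets).getD lv [])
    (fun lv => (PySem.Dict.ofList types).getD lv "")
    (fun lv => ((PySem.List.enumerate ((PySem.Dict.ofList tickets).getD lv []) 0).filter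
        (fun p => (((PySem.List.sorted (PySem.Dict.ofList types).keys (fun x => x) false).reverse.foldl
            (fun (d : PySem.Dict Int (Int × Int)) lv =>
              ((PySem.List.enumerate ((PySem.Dict.ofList tickets).getD lv []) 0).reverse).foldl
                (fun d p => d.insert p.2 (lv, p.1)) d)
            PySem.Dict.empty).get? p.2 == some (lv, p.1)))).map (fun p => p.2))
    (PySem.List.sorted (PySem.Dict.ofList types).keys (fun x => x) false)
    (by intro P lv R seen hL hseen
        exact bucket_eq (fun lv => (PySem.Dict.ofList tickets).getD lv []) _ P R lv hL hndL seen hseen)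
    (PySem.List.sorted (PySem.Dict.ofList types).keys (fun x => x) false)
    [] PySem.Dict.empty []
    rfl
    (by intro t; simp)
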